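-- pv_equiv track=rewrite | github.com/ArudhranPK/temp | Assessment-2/split_vowel.py | split_vowels
-- ===== SOURCE A (Python) =====
-- def split_vowels(word):
--     output = ""
--     for i in range(len(word)):
--         if word[i].lower() in "aeiou":
--             output += " " + word[i] + " "
--         else:
--             output += word[i]
--     return output
-- ===== SOURCE B (Python) =====
-- def split_vowels(word):
--     for v in "aeiouAEIOU":
--         word = word.replace(v, " " + v + " ")
--     return word
-- ===== Notes on version B (the rewrite author's own statement) =====
-- stated objective: faster
-- what changed: Replaces A's single per-character index loop with vowel-membership branching and repeated concatenation by ten staged whole-string replace passes, one per vowel (lower and upper case); passes cannot interfere because each inserts only spaces and the vowel itself.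
import Mathlib
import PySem

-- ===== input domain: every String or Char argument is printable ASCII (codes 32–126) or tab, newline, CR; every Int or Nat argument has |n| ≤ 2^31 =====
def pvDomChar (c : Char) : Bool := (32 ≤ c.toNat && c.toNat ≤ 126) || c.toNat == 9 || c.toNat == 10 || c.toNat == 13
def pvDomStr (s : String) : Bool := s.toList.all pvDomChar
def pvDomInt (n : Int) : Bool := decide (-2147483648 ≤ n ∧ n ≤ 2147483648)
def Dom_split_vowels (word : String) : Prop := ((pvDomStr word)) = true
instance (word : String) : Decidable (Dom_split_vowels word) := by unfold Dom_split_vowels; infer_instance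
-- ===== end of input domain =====

-- B replaces A's single per-character loop with vowel test by ten staged str.replace passes, one per vowel (faster: C-level replace).

-- ===== PORT A =====
def split_vowels (word : String) : String :=
  String.ofList ((PySem.List.pyRange 0 (PySem.Str.len word) 1).foldl
    (fun out i =>
      let c := PySem.List.pyGetD word.toList i ' '
      if PySem.Chars.isIn (PySem.Chars.lower [c]) "aeiou".toList
      then out ++ [' ', c, ' ']
      else out ++ [c]) [])

-- ===== PORT B =====
def split_vowels_alt (word : String) : String :=
  "aeiouAEIOU".toList.foldl
    (fun w v => PySem.Str.replace w (String.ofList [v]) (String.ofList [' ', v, ' ']))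
    word

-- ===== PRECONDITION & SPEC =====
def Spec_split_vowels (word : String) (out : String) : Prop := out = split_vowels_alt word
instance (word : String) (out : String) : Decidable (Spec_split_vowels word out) := by unfold Spec_split_vowels; infer_instance

-- ===== CLAIM (what is proved, stated in full; the proofs are below) =====
def Claim_equal_split_vowels : Prop := ∀ (word : String), Dom_split_vowels word → Spec_split_vowels word (split_vowels word)

-- ===== LEMMAS AND PROOFS =====

def pvStepA (c : Char) : List Char :=
  if PySem.Chars.isIn (PySem.Chars.lower [c]) "aeiou".toList then [' ', c, ' '] else [c]

def pvStepOf (vs : List Char) (c : Char) : List Char :=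
  if c ∈ vs then [' ', c, ' '] else [c]

-- replace with a single-character needle is a per-character flatMap
theorem pvReplaceGo_single (v : Char) (r : List Char) :
    ∀ (l : List Char) (fuel : Nat) (acc : List Char), l.length ≤ fuel →
      PySem.Chars.replace.go [v] r fuel l acc
        = acc.reverse ++ l.flatMap (fun c => if c = v then r else [c]) := by
  intro l
  induction l with
  | nil =>
    intro fuel acc _
    cases fuel <;> simp [PySem.Chars.replace.go]
  | cons c t ih =>
    intro fuel acc hle
    cases fuel with
    | zero => simp at hle
    | succ f =>
      by_cases hcv : v = c
      · subst hcv
        simp only [PySem.Chars.replace.go]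
        rw [if_pos (by simp)]
        simp only [List.length_cons] at hle
        simp only [List.length_cons, List.length_nil, List.drop_succ_cons, List.drop_zero]
        rw [ih f (r.reverse ++ acc) (by omega)]
        simp [List.flatMap_cons]
      · simp only [PySem.Chars.replace.go, List.isPrefixOf_iff_prefix]
        rw [if_neg (by simp [List.cons_prefix_cons, hcv])]
        simp only [List.length_cons] at hle
        rw [ih f (c :: acc) (by omega)]
        simp only [List.flatMap_cons, if_neg (fun h => hcv (Eq.symm h)), List.reverse_cons]
        simp

theorem pvReplace_single (v : Char) (r s : List Char) :
    PySem.Chars.replace s [v] r = s.flatMap (fun c => if c = v then r else [c]) := by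
  unfold PySem.Chars.replace
  rw [if_neg (by simp), pvReplaceGo_single v r s s.length [] le_rfl]
  simp

-- staged passes over a space-free, duplicate-free vowel list = one flatMap
theorem pvStaged (vs : List Char) :
    ∀ (s : List Char), ' ' ∉ vs → vs.Nodup →
      vs.foldl (fun w v => PySem.Chars.replace w [v] [' ', v, ' ']) s
        = s.flatMap (pvStepOf vs) := by
  induction vs with
  | nil =>
    intro s _ _
    have : pvStepOf [] = fun c => [c] := by
      funext c; simp [pvStepOf]
    simp [this]
  | cons v vs' ih =>
    intro s hsp hnd
    have hsp' : ' ' ∉ vs' := fun h => hsp (List.mem_cons_of_mem _ h)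
    have hvm : v ∉ vs' := (List.nodup_cons.mp hnd).1
    have hvs : v ≠ ' ' := fun h => hsp (h ▸ List.mem_cons_self)
    simp only [List.foldl_cons]
    rw [ih _ hsp' (List.nodup_cons.mp hnd).2, pvReplace_single, List.flatMap_assoc]
    apply List.flatMap_congr
    intro c _
    by_cases hc : c = v
    · subst hc
      rw [if_pos rfl]
      simp [pvStepOf, List.flatMap_cons, if_neg hsp', if_neg hvm]
    · rw [if_neg hc]
      simp [pvStepOf, List.flatMap_cons, hc]

-- one ASCII character is treated the same way by both programs
set_option maxRecDepth 4000 in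
theorem pvStep_eq (c : Char) (h : pvDomChar c = true) :
    pvStepA c = pvStepOf "aeiouAEIOU".toList c := by
  have hall : ∀ n : Nat, n < 127 →
      pvStepA (Char.ofNat n) = pvStepOf "aeiouAEIOU".toList (Char.ofNat n) := by decide
  have hlt : c.toNat < 127 := by
    simp only [pvDomChar, Bool.or_eq_true, Bool.and_eq_true, decide_eq_true_eq,
      Nat.beq_eq_true_eq] at h
    rcases h with (((⟨_, h2⟩ | h2) | h2) | h2) <;> omega
  have := hall c.toNat hlt
  rwa [Char.ofNat_toNat] at this

-- B's String-level foldl, moved to List Char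
theorem pvAltToList (vs : List Char) :
    ∀ (w : String),
      (vs.foldl (fun w v => PySem.Str.replace w (String.ofList [v]) (String.ofList [' ', v, ' '])) w).toList
        = vs.foldl (fun l v => PySem.Chars.replace l [v] [' ', v, ' ']) w.toList := by
  induction vs with
  | nil => intro w; rfl
  | cons v vs' ih =>
    intro w
    rw [List.foldl_cons, ih]
    simp [PySem.Str.replace]

-- ===== VERDICT (by name: the statement is the Claim_ definition above) =====
theorem split_vowels_spec : Claim_equal_split_vowels := by
  intro word hdom
  unfold Spec_split_vowels split_vowels
  have h1 := PySem.List.foldl_pyRange_zero_pyGetD' word.toList ' '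
    (fun o c => if PySem.Chars.isIn (PySem.Chars.lower [c]) "aeiou".toList
                then o ++ [' ', c, ' '] else o ++ [c]) []
  simp only [PySem.Str.len_eq] at h1 ⊢
  rw [h1]
  have h2 : word.toList.foldl
      (fun o c => if PySem.Chars.isIn (PySem.Chars.lower [c]) "aeiou".toList
                  then o ++ [' ', c, ' '] else o ++ [c]) []
      = word.toList.foldl (fun o c => o ++ pvStepA c) [] := by
    apply PySem.List.foldl_congr_mem
    intro o c _
    unfold pvStepA
    split <;> rfl
  have h3 : word.toList.flatMap pvStepA = word.toList.flatMap (pvStepOf "aeiouAEIOU".toList) := by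
    apply List.flatMap_congr
    intro c hc
    exact pvStep_eq c (by
      unfold Dom_split_vowels pvDomStr at hdom
      exact List.all_eq_true.mp hdom c hc)
  rw [h2, PySem.List.foldl_append_eq_flatMap, List.nil_append, h3]
  have h4 : (split_vowels_alt word).toList = word.toList.flatMap (pvStepOf "aeiouAEIOU".toList) := by
    unfold split_vowels_alt
    rw [pvAltToList, pvStaged _ _ (by decide) (by decide)]
  calc String.ofList (word.toList.flatMap (pvStepOf "aeiouAEIOU".toList))
      = String.ofList (split_vowels_alt word).toList := by rw [h4]
    _ = split_vowels_alt word := by simp
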